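-- pv_equiv track=rewrite | github.com/jorgegarcia197/CTCI-Python | AlgoExpert/strings/min_char_for_words.py | minimumCharactersForWords
-- ===== SOURCE A (Python) =====
-- from collections import Counter
--
-- def minimumCharactersForWords(words):
--     # Write your code here.
--     total_counters = {}
--     output = []
--     for word in words:
--         letter_count = Counter(word)
--         for k,v in letter_count.items():
--             if k not in total_counters:
--                 total_counters[k] = v
--             else:
--                 total_counters[k] = max(total_counters[k], v)
--     for k,v in total_counters.items():
--         output.extend([k] * v)
--
--     return output
-- ===== SOURCE B (Python) =====
-- def minimumCharactersForWords(words):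
--     # Two passes: first collect the distinct characters in first-appearance
--     # order, then compute each character's requirement as the max of its
--     # per-word frequencies by rescanning the words.
--     order = []
--     seen = set()
--     for word in words:
--         for ch in word:
--             if ch not in seen:
--                 order.append(ch)
--                 seen.add(ch)
--     output = []
--     for ch in order:
--         need = max((sum(1 for c in word if c == ch) for word in words), default=0)
--         output.extend([ch] * need)
--     return output
-- ===== Notes on version B (the rewrite author's own statement) =====
-- stated objective: alternative
-- what changed: A builds a running max-count dict in one accumulate-while-scanning pass over per-word Counters; B first collects the distinct characters in first-appearance order without counting, then computes each character's requirement by a per-character rescan of all words.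
import Mathlib
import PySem

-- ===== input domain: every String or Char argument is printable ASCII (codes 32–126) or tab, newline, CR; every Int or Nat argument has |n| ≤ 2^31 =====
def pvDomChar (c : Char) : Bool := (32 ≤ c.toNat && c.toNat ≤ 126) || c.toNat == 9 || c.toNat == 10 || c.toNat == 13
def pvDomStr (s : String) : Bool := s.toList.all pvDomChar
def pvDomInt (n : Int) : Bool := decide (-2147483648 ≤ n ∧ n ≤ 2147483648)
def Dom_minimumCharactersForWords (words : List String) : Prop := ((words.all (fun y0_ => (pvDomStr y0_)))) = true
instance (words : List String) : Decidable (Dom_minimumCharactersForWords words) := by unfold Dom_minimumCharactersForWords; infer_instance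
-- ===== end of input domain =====

-- B first collects the distinct characters in first-appearance order (no counting),
-- then rescans all words per character for its max per-word frequency; same return
-- value as A, alternative decomposition, no speed claim.

-- ===== PORT A =====
-- Python: per word, merge Counter(word).items() into total_counters by running max,
-- then extend the output with [k]*v per dict item.  In the else-branch k is a key of
-- the dict, so 'getD kv.1 0' is exactly the Python lookup 'total_counters[k]'.
def minimumCharactersForWords (words : List String) : List String :=
  ((words.foldl
    (fun d w =>
      (PySem.Dict.counter w.toList).items.foldl
        (fun d kv =>
          if !(d.contains kv.1) then d.insert kv.1 kv.2
          else d.insert kv.1 (max (d.getD kv.1 0) kv.2)) d)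
    (PySem.Dict.empty : PySem.Dict Char Int)).items).foldl
    (fun out kv => out ++ PySem.List.pyRepeat [String.ofList [kv.1]] kv.2) []

-- ===== PORT B =====
-- Source B: state (order, seen); then per collected char ch,
-- need = max((sum(1 for c in word if c == ch) for word in words), default=0)
-- and output.extend([ch] * need).
def minimumCharactersForWords_alt (words : List String) : List String :=
  ((words.foldl
    (fun st w => w.toList.foldl
      (fun st c =>
        if PySem.Set.contains st.2 c then st
        else (st.1 ++ [c], PySem.Set.add st.2 c))
      st)
    (([], PySem.Set.empty) : List Char × PySem.Set Char)).1).foldl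
    (fun out c =>
      out ++ PySem.List.pyRepeat [String.ofList [c]]
        ((PySem.List.max?
          (words.map (fun w => w.toList.foldl (fun n x => if x == c then n + 1 else n) (0 : Int)))
          (fun x => x)).getD 0)) []

-- ===== PRECONDITION & SPEC =====
def Spec_minimumCharactersForWords (words : List String) (out : List String) : Prop := out = minimumCharactersForWords_alt words
instance (words : List String) (out : List String) : Decidable (Spec_minimumCharactersForWords words out) := by unfold Spec_minimumCharactersForWords; infer_instance

-- ===== CLAIM (what is proved, stated in full; the proofs are below) =====
def Claim_equal_minimumCharactersForWords : Prop := ∀ (words : List String), Dom_minimumCharactersForWords words → Spec_minimumCharactersForWords words (minimumCharactersForWords words)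

-- ===== LEMMAS AND PROOFS =====

def pvMaxCnt (ws : List String) (c : Char) : Int :=
  ws.foldl (fun m w => max m ((w.toList.count c : Int))) 0

lemma pvMaxCnt_nonneg (ws : List String) (c : Char) : 0 ≤ pvMaxCnt ws c := by
  have aux : ∀ (l : List String) (m : Int), m ≤ l.foldl (fun m w => max m ((w.toList.count c : Int))) m := by
    intro l
    induction l with
    | nil => simp
    | cons w t ih => intro m; exact le_trans (le_max_left _ _) (ih _)
  exact aux ws 0

lemma pvMaxCnt_append (ws : List String) (w : String) (c : Char) :
    pvMaxCnt (ws ++ [w]) c = max (pvMaxCnt ws c) ((w.toList.count c : Int)) := by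
  simp [pvMaxCnt]

lemma pvMaxCnt_zero (ws : List String) (c : Char)
    (h : ∀ w ∈ ws, c ∉ w.toList) : pvMaxCnt ws c = 0 := by
  induction ws with
  | nil => rfl
  | cons w t ih =>
    have h0 : w.toList.count c = 0 := List.count_eq_zero.mpr (h w (by simp))
    have : pvMaxCnt (w :: t) c = pvMaxCnt t c := by
      simp [pvMaxCnt, h0]
    rw [this]; exact ih (fun w' hw' => h w' (by simp [hw']))

lemma update_ofList (S : PySem.Set Char) (xs : List Char) :
    PySem.Set.update S (PySem.Set.ofList xs) = PySem.Set.update S xs := by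
  rw [PySem.Set.update_eq_append_filter, PySem.Set.update_eq_append_filter, PySem.Set.ofList_ofList]

lemma maxGetD_eq_foldl (xs : List Int) (h : ∀ x ∈ xs, 0 ≤ x) :
    (PySem.List.max? xs (fun x => x)).getD 0 = xs.foldl max 0 := by
  cases xs with
  | nil => rfl
  | cons x t =>
    rw [PySem.List.max?_id_cons]
    simp only [Option.getD_some, List.foldl_cons]
    rw [max_eq_right (h x (by simp))]

lemma innerB :
    ∀ (cs : List Char) (s : PySem.Set Char),
    (cs.foldl
      (fun st c =>
        if PySem.Set.contains st.2 c then st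
        else (st.1 ++ [c], PySem.Set.add st.2 c)) ((s, s) : List Char × PySem.Set Char))
    = (PySem.Set.update s cs, PySem.Set.update s cs) := by
  intro cs
  induction cs with
  | nil => intro s; simp [PySem.Set.update]
  | cons c t ih =>
    intro s
    rw [List.foldl_cons, PySem.Set.update_cons]
    by_cases hc : c ∈ s
    · rw [(PySem.Set.contains_iff s c).mpr hc]
      simp only [if_true]
      rw [PySem.Set.add_of_mem hc]
      exact ih s
    · have : PySem.Set.contains s c = false := by
        rw [Bool.eq_false_iff]; intro h; exact hc ((PySem.Set.contains_iff s c).mp h)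
      simp only [this, Bool.false_eq_true, if_false]
      rw [PySem.Set.add_of_not_mem hc]
      exact ih (s ++ [c])

lemma outerB :
    ∀ (ws : List String) (s : PySem.Set Char),
    (ws.foldl
      (fun st w => w.toList.foldl
        (fun st c =>
          if PySem.Set.contains st.2 c then st
          else (st.1 ++ [c], PySem.Set.add st.2 c))
        st) ((s, s) : List Char × PySem.Set Char))
    = (PySem.Set.update s (ws.flatMap String.toList), PySem.Set.update s (ws.flatMap String.toList)) := by
  intro ws
  induction ws with
  | nil => intro s; simp [PySem.Set.update]
  | cons w t ih =>
    intro s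
    rw [List.foldl_cons, innerB w.toList s, ih (PySem.Set.update s w.toList)]
    rw [List.flatMap_cons, PySem.Set.update_append]

lemma needB (ws : List String) (c : Char) :
    (PySem.List.max?
      (ws.map (fun w => w.toList.foldl (fun n x => if x == c then n + 1 else n) (0 : Int)))
      (fun x => x)).getD 0 = pvMaxCnt ws c := by
  have hmap : (ws.map (fun w => w.toList.foldl (fun n x => if x == c then n + 1 else n) (0 : Int)))
      = ws.map (fun w => ((w.toList.count c : Int))) := by
    apply List.map_congr_left
    intro w _
    rw [PySem.List.foldl_beq_add_one]
    simp
  rw [hmap, maxGetD_eq_foldl _ (by intro x hx; obtain ⟨w, _, rfl⟩ := List.mem_map.mp hx; positivity)]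
  rw [List.foldl_map]
  rfl

lemma innerA (v : Char → Int) :
    ∀ (K : List Char) (d : PySem.Dict Char Int) (S : List Char) (g : Char → Int),
    K.Nodup → S.Nodup → d.items = S.map (fun c => (c, g c)) →
    (K.foldl
      (fun d k =>
        if !(d.contains k) then d.insert k (v k)
        else d.insert k (max (d.getD k 0) (v k))) d).items
    = (PySem.Set.update S K).map
        (fun c => (c, if c ∈ K then (if c ∈ S then max (g c) (v c) else v c) else g c)) := by
  intro K
  induction K with
  | nil =>
    intro d S g _ _ hitems
    simpa using hitems
  | cons k K' ih =>
    intro d S g hK hS hitems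
    have hkK' : k ∉ K' := (List.nodup_cons.mp hK).1
    have hK' : K'.Nodup := (List.nodup_cons.mp hK).2
    have hkeys : d.keys = S := by
      simp only [PySem.Dict.keys, hitems, List.map_map]
      exact List.map_id S
    have hcont : d.contains k = decide (k ∈ S) := by
      rw [PySem.Dict.contains_eq_decide_mem_keys, hkeys]
    rw [List.foldl_cons]
    by_cases hk : k ∈ S
    · have hcontT : d.contains k = true := by rw [hcont]; exact decide_eq_true hk
      rw [hcontT]
      simp only [Bool.not_true, Bool.false_eq_true, if_false]
      have hget : d.getD k 0 = g k := by
        apply PySem.Dict.getD_of_mem_items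
        · rw [hitems]; exact List.mem_map.mpr ⟨k, hk, rfl⟩
        · rw [hkeys]; exact hS
      rw [hget]
      have hitems' : (d.insert k (max (g k) (v k))).items
          = S.map (fun c => (c, if c = k then max (g k) (v k) else g c)) := by
        rw [PySem.Dict.items_insert_of_contains d _ hcontT, hitems, List.map_map]
        apply List.map_congr_left
        intro c _
        by_cases hck : c = k
        · subst hck; simp
        · simp [hck]
      rw [ih _ S _ hK' hS hitems']
      rw [PySem.Set.update_cons, PySem.Set.add_of_mem hk]
      apply List.map_congr_left
      intro c _
      by_cases hck : c = k
      · subst hck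
        simp [hkK', hk]
      · simp only [hck, if_false, List.mem_cons, false_or]
    · have hcontF : d.contains k = false := by
        rw [hcont]; exact decide_eq_false hk
      simp only [hcontF, Bool.not_false, if_true]
      have hnodup' : (S ++ [k]).Nodup := by
        rw [List.nodup_append]
        refine ⟨hS, List.nodup_singleton k, ?_⟩
        intro a ha b hb
        rw [List.mem_singleton] at hb
        subst hb
        exact fun h => hk (h ▸ ha)
      have hitems' : (d.insert k (v k)).items
          = (S ++ [k]).map (fun c => (c, if c = k then v k else g c)) := by
        rw [PySem.Dict.items_insert_of_not_contains d _ hcontF, hitems]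
        rw [List.map_append]
        congr 1
        · apply List.map_congr_left
          intro c hc
          have hck : ¬ c = k := fun h => hk (h ▸ hc)
          simp [hck]
        · simp
      rw [ih _ (S ++ [k]) _ hK' hnodup' hitems']
      rw [PySem.Set.update_cons, PySem.Set.add_of_not_mem hk]
      apply List.map_congr_left
      intro c _
      by_cases hck : c = k
      · subst hck
        simp [hkK', hk]
      · have hmem : (c ∈ S ++ [k]) = (c ∈ S) := by simp [hck]
        simp only [hck, if_false, List.mem_cons, false_or, hmem]

lemma totalA (ws : List String) :
    (ws.foldl
      (fun d w =>
        (PySem.Dict.counter w.toList).items.foldl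
          (fun d kv =>
            if !(d.contains kv.1) then d.insert kv.1 kv.2
            else d.insert kv.1 (max (d.getD kv.1 0) kv.2)) d)
      (PySem.Dict.empty : PySem.Dict Char Int)).items
    = (PySem.Set.ofList (ws.flatMap String.toList)).map (fun c => (c, pvMaxCnt ws c)) := by
  induction ws using List.reverseRecOn with
  | nil => rfl
  | append_singleton ws w ih =>
    rw [List.foldl_append, List.foldl_cons, List.foldl_nil]
    rw [PySem.Dict.items_counter, List.foldl_map]
    rw [innerA (fun k => (w.toList.count k : Int)) (PySem.Set.ofList w.toList) _
        (PySem.Set.ofList (ws.flatMap String.toList)) (pvMaxCnt ws)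
        (PySem.Set.nodup_ofList _) (PySem.Set.nodup_ofList _) ih]
    rw [update_ofList]
    have hO : PySem.Set.ofList ((ws ++ [w]).flatMap String.toList)
        = PySem.Set.update (PySem.Set.ofList (ws.flatMap String.toList)) w.toList := by
      rw [List.flatMap_append, PySem.Set.ofList_append]
      simp
    rw [hO]
    apply List.map_congr_left
    intro c hc
    rw [pvMaxCnt_append]
    by_cases hw : c ∈ w.toList
    · rw [if_pos ((PySem.Set.mem_ofList _ _).mpr hw)]
      by_cases hprev : c ∈ PySem.Set.ofList (ws.flatMap String.toList)
      · rw [if_pos hprev]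
      · rw [if_neg hprev]
        have h0 : pvMaxCnt ws c = 0 := by
          apply pvMaxCnt_zero
          intro w' hw' hmem
          exact hprev ((PySem.Set.mem_ofList _ _).mpr (List.mem_flatMap.mpr ⟨w', hw', hmem⟩))
        rw [h0, max_eq_right (by positivity)]
    · rw [if_neg (fun h => hw ((PySem.Set.mem_ofList _ _).mp h))]
      rw [List.count_eq_zero.mpr hw]
      simp [max_eq_left (pvMaxCnt_nonneg ws c)]

-- ===== VERDICT (by name: the statement is the Claim_ definition above) =====
theorem minimumCharactersForWords_spec : Claim_equal_minimumCharactersForWords := by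
  intro words _
  unfold Spec_minimumCharactersForWords minimumCharactersForWords minimumCharactersForWords_alt
  rw [show (([], PySem.Set.empty) : List Char × PySem.Set Char) = (PySem.Set.empty, PySem.Set.empty) from rfl]
  rw [outerB words PySem.Set.empty]
  rw [totalA words]
  rw [PySem.List.foldl_append_eq_flatMap, PySem.List.foldl_append_eq_flatMap]
  simp only [List.nil_append]
  have h1 : PySem.Set.update PySem.Set.empty (words.flatMap String.toList)
      = PySem.Set.ofList (words.flatMap String.toList) := PySem.Set.update_nil_left _
  rw [h1]
  rw [List.flatMap_map]
  congr 1
  funext c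
  rw [needB words c]
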